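-- pv_equiv track=rewrite | github.com/ZhengWeiLim/cultural-keywords-osf | src/evaluation.py | expand_tr_freq
-- ===== SOURCE A (Python) =====
-- def expand_tr_freq(tr_freq, wsamples):
--     # register repeatedly sampled words as new words
--     w_fq = {lang: {} for lang in tr_freq}
--     w_count = {}
--     for w in wsamples:
--         for lang in tr_freq:
--             if w in tr_freq[lang]:
--                 current_wcount = w_count.get(w, 0)
--                 if current_wcount > 0:
--                     w_fq[lang][f"{w}_{current_wcount}"] = tr_freq[lang][w]
--                 else:
--                     w_fq[lang][w] = tr_freq[lang][w]
--         w_count[w] = w_count.get(w, 0) + 1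
--     return w_fq
-- ===== SOURCE B (Python) =====
-- def expand_tr_freq(tr_freq, wsamples):
--     # Two-phase: first compute the suffixed name of every sample once,
--     # then fill each language's dict in one pass over that name table.
--     count = {}
--     named = []
--     for w in wsamples:
--         c = count.get(w, 0)
--         named.append((w, w if c == 0 else f"{w}_{c}"))
--         count[w] = c + 1
--     return {lang: {name: freq[w] for w, name in named if w in freq}
--             for lang, freq in tr_freq.items()}
-- ===== Notes on version B (the rewrite author's own statement) =====
-- stated objective: simpler
-- what changed: B computes the suffixed name of each sampled word once in a single counting pass (a (word, name) table), then builds the result as one dict comprehension per language over that table, instead of A's interleaved per-word update of all language dicts with a running counter.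
import Mathlib
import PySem

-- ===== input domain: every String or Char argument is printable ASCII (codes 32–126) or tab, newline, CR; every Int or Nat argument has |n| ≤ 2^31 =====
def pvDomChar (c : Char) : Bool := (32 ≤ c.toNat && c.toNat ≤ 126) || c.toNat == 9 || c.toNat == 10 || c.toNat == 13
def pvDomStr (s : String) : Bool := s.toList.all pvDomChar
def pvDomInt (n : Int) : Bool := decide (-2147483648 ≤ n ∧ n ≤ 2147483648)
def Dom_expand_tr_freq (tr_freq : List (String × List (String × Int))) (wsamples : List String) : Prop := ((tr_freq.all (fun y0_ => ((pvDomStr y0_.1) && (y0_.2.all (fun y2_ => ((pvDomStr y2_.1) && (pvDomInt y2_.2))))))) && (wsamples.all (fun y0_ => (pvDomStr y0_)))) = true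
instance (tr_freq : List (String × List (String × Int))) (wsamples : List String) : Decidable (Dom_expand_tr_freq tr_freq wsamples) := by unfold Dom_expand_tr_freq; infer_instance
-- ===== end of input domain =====

-- B separates the work into one counting pass that names every sampled word and one
-- per-language pass over that name table, instead of A's interleaved nested update loop (objective: simpler).


-- ===== PORT A =====
def expand_tr_freq (tr_freq : List (String × List (String × Int))) (wsamples : List String) : List (String × List (String × Int)) :=
  -- w_fq = {lang: {} for lang in tr_freq}
  let w_fq0 : PySem.Dict String (PySem.Dict String Int) :=
    tr_freq.foldl (fun d p => d.insert p.1 PySem.Dict.empty) PySem.Dict.empty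
  let st :=
    wsamples.foldl
      (fun (st : PySem.Dict String (PySem.Dict String Int) × PySem.Dict String Int) w =>
        let w_fq :=
          tr_freq.foldl
            (fun fq p =>
              match (PySem.Dict.mk tr_freq).get? p.1 with   -- tr_freq[lang]
              | none => fq
              | some freq =>
                match (PySem.Dict.mk freq).get? w with      -- if w in tr_freq[lang] (and its value)
                | none => fq
                | some v =>
                  let c := st.2.getD w 0                    -- w_count.get(w, 0)
                  if c > 0 then
                    fq.modify p.1 PySem.Dict.empty (fun inner => inner.insert (w ++ "_" ++ PySem.Int.toStr c) v)
                  else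
                    fq.modify p.1 PySem.Dict.empty (fun inner => inner.insert w v))
            st.1
        (w_fq, st.2.insert w (st.2.getD w 0 + 1)))          -- w_count[w] = w_count.get(w, 0) + 1
      (w_fq0, PySem.Dict.empty)
  st.1.items.map (fun p => (p.1, p.2.items))

-- ===== PORT B =====
def expand_tr_freq_alt (tr_freq : List (String × List (String × Int))) (wsamples : List String) : List (String × List (String × Int)) :=
  let named : List (String × String) :=
    (wsamples.foldl
      (fun (st : PySem.Dict String Int × List (String × String)) w =>
        let c := st.1.getD w 0
        (st.1.insert w (c + 1), st.2 ++ [(w, if c == 0 then w else w ++ "_" ++ PySem.Int.toStr c)]))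
      (PySem.Dict.empty, [])).2
  -- {lang: {name: freq[w] for w, name in named if w in freq} for lang, freq in tr_freq.items()}
  -- outer dict comprehension keyed by the (distinct, cf. Pre_) language keys = a map over the items
  tr_freq.map (fun p =>
    (p.1,
      (named.foldl
        (fun (inner : PySem.Dict String Int) q =>
          match (PySem.Dict.mk p.2).get? q.1 with
          | none => inner
          | some v => inner.insert q.2 v)
        PySem.Dict.empty).items))

-- ===== PRECONDITION & SPEC =====
-- Pre_ excludes association lists whose outer (language) or inner (word) key lists contain
-- duplicate keys: those lists do not represent any Python dict input of A, which receives dicts.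
def Pre_expand_tr_freq (tr_freq : List (String × List (String × Int))) (wsamples : List String) : Prop :=
  (tr_freq.map Prod.fst).Nodup ∧ ∀ p ∈ tr_freq, (p.2.map Prod.fst).Nodup
instance (tr_freq : List (String × List (String × Int))) (wsamples : List String) : Decidable (Pre_expand_tr_freq tr_freq wsamples) := by unfold Pre_expand_tr_freq; infer_instance
def pvWitness_expand_tr_freq : (List (String × List (String × Int))) × List String :=
  ([("en", [("a", 3), ("b", 2)]), ("de", [("a", 5)])], ["a", "b", "a"])
def Spec_expand_tr_freq (tr_freq : List (String × List (String × Int))) (wsamples : List String) (out : List (String × List (String × Int))) : Prop := out = expand_tr_freq_alt tr_freq wsamples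
instance (tr_freq : List (String × List (String × Int))) (wsamples : List String) (out : List (String × List (String × Int))) : Decidable (Spec_expand_tr_freq tr_freq wsamples out) := by unfold Spec_expand_tr_freq; infer_instance

-- ===== CLAIM (what is proved, stated in full; the proofs are below) =====
def Claim_equal_expand_tr_freq : Prop := ∀ (tr_freq : List (String × List (String × Int))) (wsamples : List String), Dom_expand_tr_freq tr_freq wsamples → Pre_expand_tr_freq tr_freq wsamples → Spec_expand_tr_freq tr_freq wsamples (expand_tr_freq tr_freq wsamples)

-- ===== LEMMAS AND PROOFS =====

-- the suffixed name a word receives when its running count is c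
def pvName (c : Int) (w : String) : String := if c == 0 then w else w ++ "_" ++ PySem.Int.toStr c

-- the (word, name) table B computes, as a structural recursion over the samples
def pvNamed (cnt : PySem.Dict String Int) : List String → List (String × String)
  | [] => []
  | w :: ws => (w, pvName (cnt.getD w 0) w) :: pvNamed (cnt.insert w (cnt.getD w 0 + 1)) ws

-- one step of B's inner dict comprehension
def pvInner (freq : List (String × Int)) (inner : PySem.Dict String Int) (q : String × String) : PySem.Dict String Int :=
  match (PySem.Dict.mk freq).get? q.1 with
  | none => inner
  | some v => inner.insert q.2 v

lemma pvNamed_spec (ws : List String) : ∀ (cnt : PySem.Dict String Int) (acc : List (String × String)),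
    (ws.foldl
      (fun (st : PySem.Dict String Int × List (String × String)) w =>
        let c := st.1.getD w 0
        (st.1.insert w (c + 1), st.2 ++ [(w, if c == 0 then w else w ++ "_" ++ PySem.Int.toStr c)]))
      (cnt, acc)).2 = acc ++ pvNamed cnt ws := by
  induction ws with
  | nil => intro cnt acc; simp [pvNamed]
  | cons w ws ih =>
    intro cnt acc
    simp only [List.foldl_cons]
    rw [ih]
    simp [pvNamed, pvName]

lemma pv_get?_mk_append {ν : Type} (pre : List (String × ν)) (k : String) (v0 : ν) (rest : List (String × ν))
    (hpre : ∀ q ∈ pre, q.1 ≠ k) :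
    (PySem.Dict.mk (pre ++ (k, v0) :: rest)).get? k = some v0 := by
  induction pre with
  | nil => simp [PySem.Dict.get?_mk_cons]
  | cons q pre ih =>
    obtain ⟨qk, qv⟩ := q
    have hq : qk ≠ k := hpre (qk, qv) (by simp)
    simp only [List.cons_append, PySem.Dict.get?_mk_cons, beq_iff_eq, if_neg hq]
    exact ih (fun r hr => hpre r (by simp [hr]))

lemma pv_map_replace_eq_self {ν : Type} (l : List (String × ν)) (k : String) (v : ν)
    (h : ∀ q ∈ l, q.1 ≠ k) :
    l.map (fun p => if p.1 == k then (k, v) else p) = l := by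
  induction l with
  | nil => rfl
  | cons q l ih =>
    have hqf : (q.1 == k) = false := by simpa using h q (by simp)
    simp only [List.map_cons, hqf, Bool.false_eq_true, if_false]
    rw [ih (fun r hr => h r (by simp [hr]))]

lemma pv_insert_mk_append {ν : Type} (pre : List (String × ν)) (k : String) (v0 v : ν) (rest : List (String × ν))
    (hpre : ∀ q ∈ pre, q.1 ≠ k) (hrest : ∀ q ∈ rest, q.1 ≠ k) :
    (PySem.Dict.mk (pre ++ (k, v0) :: rest)).insert k v = PySem.Dict.mk (pre ++ (k, v) :: rest) := by
  have hcont : (PySem.Dict.mk (pre ++ (k, v0) :: rest)).contains k = true := by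
    simp [PySem.Dict.contains]
  simp only [PySem.Dict.insert, hcont, if_pos]
  congr 1
  simp only [List.map_append, List.map_cons, beq_self_eq_true, if_pos]
  rw [pv_map_replace_eq_self pre k v hpre, pv_map_replace_eq_self rest k v hrest]

lemma pv_modify_mk_append {ν : Type} (pre : List (String × ν)) (k : String) (v0 : ν) (rest : List (String × ν))
    (dflt : ν) (f : ν → ν) (hpre : ∀ q ∈ pre, q.1 ≠ k) (hrest : ∀ q ∈ rest, q.1 ≠ k) :
    (PySem.Dict.mk (pre ++ (k, v0) :: rest)).modify k dflt f = PySem.Dict.mk (pre ++ (k, f v0) :: rest) := by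
  have hg := pv_get?_mk_append pre k v0 rest hpre
  simp only [PySem.Dict.modify, PySem.Dict.getD_eq_get?_getD, hg, Option.getD_some]
  exact pv_insert_mk_append pre k v0 (f v0) rest hpre hrest

-- the inner loop over the languages, with the lookup already resolved to the entry's own freq list
lemma pv_inner_fold (w name : String) (l : List (String × List (String × Int))) :
    ∀ (pre : List (String × PySem.Dict String Int)) (g : String × List (String × Int) → PySem.Dict String Int),
    (pre.map Prod.fst ++ l.map Prod.fst).Nodup →
    l.foldl
      (fun fq p =>
        match (PySem.Dict.mk p.2).get? w with
        | none => fq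
        | some v => fq.modify p.1 PySem.Dict.empty (fun inner => inner.insert name v))
      (PySem.Dict.mk (pre ++ l.map (fun p => (p.1, g p))))
    = PySem.Dict.mk (pre ++ l.map (fun p => (p.1, pvInner p.2 (g p) (w, name)))) := by
  induction l with
  | nil => intro pre g _; simp
  | cons p l ih =>
    intro pre g hnd
    have hpre : ∀ q ∈ pre, q.1 ≠ p.1 := by
      intro q hq
      have h3 := (List.nodup_append.mp hnd).2.2
      exact h3 q.1 (List.mem_map.mpr ⟨q, hq, rfl⟩) p.1 (by simp)
    have hrest : ∀ q ∈ l.map (fun p => (p.1, g p)), q.1 ≠ p.1 := by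
      intro q hq
      have h2 : (p.1 :: l.map Prod.fst).Nodup := by
        simpa using (List.nodup_append.mp hnd).2.1
      rcases List.mem_map.mp hq with ⟨r, hr, rfl⟩
      intro h
      exact (List.nodup_cons.mp h2).1 (h ▸ List.mem_map.mpr ⟨r, hr, rfl⟩)
    have hnd' : ∀ x : PySem.Dict String Int,
        ((pre ++ [(p.1, x)]).map Prod.fst ++ l.map Prod.fst).Nodup := by
      intro x; simpa [List.append_assoc] using hnd
    simp only [List.map_cons, List.foldl_cons]
    cases hv : (PySem.Dict.mk p.2).get? w with
    | none =>
      have hgp : pvInner p.2 (g p) (w, name) = g p := by simp [pvInner, hv]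
      have h2 := ih (pre ++ [(p.1, g p)]) g (hnd' _)
      simpa [List.append_assoc, hgp] using h2
    | some v =>
      have hstep : (PySem.Dict.mk (pre ++ (p.1, g p) :: l.map (fun p => (p.1, g p)))).modify p.1 PySem.Dict.empty
            (fun inner => inner.insert name v)
          = PySem.Dict.mk ((pre ++ [(p.1, pvInner p.2 (g p) (w, name))]) ++ l.map (fun p => (p.1, g p))) := by
        rw [pv_modify_mk_append pre p.1 (g p) _ _ _ hpre hrest]
        simp [pvInner, hv, List.append_assoc]
      simp only [hstep]
      rw [ih _ g (hnd' _)]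
      simp [List.append_assoc]

-- A's per-sample step function (definitionally the lambda inside expand_tr_freq)
def pvStepA (tr : List (String × List (String × Int)))
    (st : PySem.Dict String (PySem.Dict String Int) × PySem.Dict String Int) (w : String) :
    PySem.Dict String (PySem.Dict String Int) × PySem.Dict String Int :=
  let w_fq :=
    tr.foldl
      (fun fq p =>
        match (PySem.Dict.mk tr).get? p.1 with
        | none => fq
        | some freq =>
          match (PySem.Dict.mk freq).get? w with
          | none => fq
          | some v =>
            let c := st.2.getD w 0
            if c > 0 then
              fq.modify p.1 PySem.Dict.empty (fun inner => inner.insert (w ++ "_" ++ PySem.Int.toStr c) v)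
            else
              fq.modify p.1 PySem.Dict.empty (fun inner => inner.insert w v))
      st.1
  (w_fq, st.2.insert w (st.2.getD w 0 + 1))

-- one A-step from a map-shaped state is a pvInner update of every language's dict
lemma pv_step (tr : List (String × List (String × Int))) (hnd : (tr.map Prod.fst).Nodup)
    (cnt : PySem.Dict String Int) (g : String × List (String × Int) → PySem.Dict String Int)
    (w : String) (hnn : ∀ x, 0 ≤ cnt.getD x 0) :
    pvStepA tr (PySem.Dict.mk (tr.map (fun p => (p.1, g p))), cnt) w
    = (PySem.Dict.mk (tr.map (fun p => (p.1, pvInner p.2 (g p) (w, pvName (cnt.getD w 0) w)))),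
       cnt.insert w (cnt.getD w 0 + 1)) := by
  have hlook : ∀ p ∈ tr, (PySem.Dict.mk tr).get? p.1 = some p.2 := by
    intro p hp
    exact PySem.Dict.get?_of_mem_items (d := PySem.Dict.mk tr) (k := p.1) (v := p.2) hp (by simpa using hnd)
  have hbody : tr.foldl
      (fun fq p =>
        match (PySem.Dict.mk tr).get? p.1 with
        | none => fq
        | some freq =>
          match (PySem.Dict.mk freq).get? w with
          | none => fq
          | some v =>
            if cnt.getD w 0 > 0 then
              fq.modify p.1 PySem.Dict.empty (fun inner => inner.insert (w ++ "_" ++ PySem.Int.toStr (cnt.getD w 0)) v)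
            else
              fq.modify p.1 PySem.Dict.empty (fun inner => inner.insert w v))
      (PySem.Dict.mk (tr.map (fun p => (p.1, g p))))
      = PySem.Dict.mk (tr.map (fun p => (p.1, pvInner p.2 (g p) (w, pvName (cnt.getD w 0) w)))) := by
    have hcongr : ∀ (fq : PySem.Dict String (PySem.Dict String Int)), ∀ p ∈ tr,
        (match (PySem.Dict.mk tr).get? p.1 with
         | none => fq
         | some freq =>
           match (PySem.Dict.mk freq).get? w with
           | none => fq
           | some v =>
             if cnt.getD w 0 > 0 then
               fq.modify p.1 PySem.Dict.empty (fun inner => inner.insert (w ++ "_" ++ PySem.Int.toStr (cnt.getD w 0)) v)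
             else
               fq.modify p.1 PySem.Dict.empty (fun inner => inner.insert w v))
        = (match (PySem.Dict.mk p.2).get? w with
           | none => fq
           | some v => fq.modify p.1 PySem.Dict.empty (fun inner => inner.insert (pvName (cnt.getD w 0) w) v)) := by
      intro fq p hp
      simp only [hlook p hp]
      cases (PySem.Dict.mk p.2).get? w with
      | none => rfl
      | some v =>
        by_cases h0 : cnt.getD w 0 = 0
        · simp [h0, pvName]
        · have hpos : cnt.getD w 0 > 0 := lt_of_le_of_ne (hnn w) (Ne.symm h0)
          simp [pvName, h0, hpos]
    rw [PySem.List.foldl_congr_mem _ _ _ _ hcongr]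
    exact pv_inner_fold w (pvName (cnt.getD w 0) w) tr [] g (by simpa using hnd)
  exact congrArg₂ Prod.mk hbody rfl

-- the outer loop of A, characterised as B's per-language fold over the name table
lemma pv_main (tr : List (String × List (String × Int))) (hnd : (tr.map Prod.fst).Nodup)
    (ws : List String) :
    ∀ (cnt : PySem.Dict String Int) (g : String × List (String × Int) → PySem.Dict String Int),
    (∀ x, 0 ≤ cnt.getD x 0) →
    (ws.foldl (pvStepA tr) (PySem.Dict.mk (tr.map (fun p => (p.1, g p))), cnt)).1
    = PySem.Dict.mk (tr.map (fun p => (p.1, (pvNamed cnt ws).foldl (pvInner p.2) (g p)))) := by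
  induction ws with
  | nil => intro cnt g _; simp [pvNamed]
  | cons w ws ih =>
    intro cnt g hnn
    rw [List.foldl_cons, pv_step tr hnd cnt g w hnn]
    have hnn' : ∀ x, 0 ≤ (cnt.insert w (cnt.getD w 0 + 1)).getD x 0 := by
      intro x
      rw [PySem.Dict.getD_insert]
      split
      · have := hnn w; omega
      · exact hnn x
    have h2 := ih (cnt.insert w (cnt.getD w 0 + 1))
      (fun p => pvInner p.2 (g p) (w, pvName (cnt.getD w 0) w)) hnn'
    refine h2.trans ?_
    simp [pvNamed]

-- initial w_fq has the map shape
lemma pv_init (tr : List (String × List (String × Int))) (hnd : (tr.map Prod.fst).Nodup) :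
    tr.foldl (fun (d : PySem.Dict String (PySem.Dict String Int)) p => d.insert p.1 PySem.Dict.empty) PySem.Dict.empty
    = PySem.Dict.mk (tr.map (fun p => (p.1, PySem.Dict.empty))) := by
  apply PySem.Dict.ext
  rw [PySem.Dict.items_foldl_insert_fresh tr Prod.fst (fun _ => PySem.Dict.empty) PySem.Dict.empty
    (fun a _ => PySem.Dict.contains_empty _) hnd]
  simp [PySem.Dict.empty]

lemma pvInner_eq (freq : List (String × Int)) :
    pvInner freq = (fun (inner : PySem.Dict String Int) (q : String × String) =>
      match (PySem.Dict.mk freq).get? q.1 with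
      | none => inner
      | some v => inner.insert q.2 v) := by
  funext inner q
  rfl

-- A, rewritten through pvStepA (definitional)
lemma pvA_eq (tr : List (String × List (String × Int))) (ws : List String) :
    expand_tr_freq tr ws
    = ((ws.foldl (pvStepA tr)
        (tr.foldl (fun (d : PySem.Dict String (PySem.Dict String Int)) p => d.insert p.1 PySem.Dict.empty) PySem.Dict.empty,
         PySem.Dict.empty)).1.items.map (fun p => (p.1, p.2.items))) := rfl

-- ===== VERDICT (by name: the statement is the Claim_ definition above) =====
theorem expand_tr_freq_spec : Claim_equal_expand_tr_freq := by
  intro tr ws _ hpre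
  unfold Spec_expand_tr_freq
  rw [pvA_eq, pv_init tr hpre.1]
  rw [pv_main tr hpre.1 ws PySem.Dict.empty (fun _ => PySem.Dict.empty) (by intro x; simp)]
  unfold expand_tr_freq_alt
  rw [pvNamed_spec ws PySem.Dict.empty []]
  simp [pvInner_eq]
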